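-- pv_equiv track=rewrite | github.com/MahnoorArif-dot/IntroductionToDataScience | ids_assignment2_task2.py | separate_ids
-- ===== SOURCE A (Python) =====
-- def separate_ids(transactions):
--
--     transaction_ids = []
--     user_ids = []
--
--     for transaction in transactions:
--         if len(transaction) != 4:
--             raise ValueError(f"Inconsistent tuple size: {transaction}")
--         transaction_ids.append(transaction[0])
--         user_ids.append(transaction[1])
--
--     return transaction_ids, user_ids
-- ===== SOURCE B (Python) =====
-- def separate_ids(transactions):
--     rows = list(transactions)
--     for transaction in rows:
--         if len(transaction) != 4:
--             raise ValueError(f"Inconsistent tuple size: {transaction}")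
--     if not rows:
--         return [], []
--     cols = list(zip(*rows))
--     return list(cols[0]), list(cols[1])
-- ===== Notes on version B (the rewrite author's own statement) =====
-- stated objective: idiomatic
-- what changed: Replaces two parallel row-by-row appends with a single zip(*rows) transpose after a separate validation pass, returning the first two columns (empty case guarded).
import Mathlib
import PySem

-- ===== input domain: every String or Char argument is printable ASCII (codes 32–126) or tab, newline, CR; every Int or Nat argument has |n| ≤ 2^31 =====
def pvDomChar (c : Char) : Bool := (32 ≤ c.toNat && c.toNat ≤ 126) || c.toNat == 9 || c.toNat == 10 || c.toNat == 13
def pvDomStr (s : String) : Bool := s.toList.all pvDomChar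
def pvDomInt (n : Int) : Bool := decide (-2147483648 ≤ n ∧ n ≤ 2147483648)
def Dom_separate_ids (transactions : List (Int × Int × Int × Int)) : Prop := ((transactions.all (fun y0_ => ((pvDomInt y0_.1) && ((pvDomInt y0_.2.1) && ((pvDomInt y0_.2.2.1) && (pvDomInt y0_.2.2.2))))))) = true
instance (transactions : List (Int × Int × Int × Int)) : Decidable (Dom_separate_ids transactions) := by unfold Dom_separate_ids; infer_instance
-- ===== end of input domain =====

-- ===== PORT A =====
-- B transposes with zip(*rows) instead of A's two parallel appends; the length==4 check is always
-- true for typed 4-tuples, so both functions are total here.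
def separate_ids (transactions : List (Int × Int × Int × Int)) : List Int × List Int :=
  let st := transactions.foldl
    (fun (acc : List Int × List Int) t =>
      -- len(transaction) != 4 is never true for a 4-tuple
      (acc.1 ++ [t.1], acc.2 ++ [t.2.1]))
    ([], [])
  (st.1, st.2)

-- ===== PORT B =====
def separate_ids_alt (transactions : List (Int × Int × Int × Int)) : List Int × List Int :=
  -- rows = list(transactions); validation loop is vacuous on 4-tuples
  if transactions = [] then ([], [])
  else
    -- zip(*rows): column-major transpose; take columns 0 and 1
    (transactions.map (fun t => t.1), transactions.map (fun t => t.2.1))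

-- ===== PRECONDITION & SPEC =====
def Spec_separate_ids (transactions : List (Int × Int × Int × Int)) (out : List Int × List Int) : Prop := out = separate_ids_alt transactions
instance (transactions : List (Int × Int × Int × Int)) (out : List Int × List Int) : Decidable (Spec_separate_ids transactions out) := by unfold Spec_separate_ids; infer_instance

-- ===== CLAIM (what is proved, stated in full; the proofs are below) =====
def Claim_equal_separate_ids : Prop := ∀ (transactions : List (Int × Int × Int × Int)), Dom_separate_ids transactions → Spec_separate_ids transactions (separate_ids transactions)

-- ===== LEMMAS AND PROOFS =====

-- ===== VERDICT (by name: the statement is the Claim_ definition above) =====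
theorem separate_ids_foldl (transactions : List (Int × Int × Int × Int))
    (a b : List Int) :
    transactions.foldl
      (fun (acc : List Int × List Int) t => (acc.1 ++ [t.1], acc.2 ++ [t.2.1])) (a, b)
      = (a ++ transactions.map (fun t => t.1), b ++ transactions.map (fun t => t.2.1)) := by
  induction transactions generalizing a b with
  | nil => simp
  | cons h tl ih => simp [List.foldl, ih]

theorem separate_ids_spec : Claim_equal_separate_ids := by
  intro transactions _
  unfold Spec_separate_ids separate_ids separate_ids_alt
  cases transactions with
  | nil => simp
  | cons h tl => simp [separate_ids_foldl]
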